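-- pv_equiv track=rewrite | github.com/szachnat/sise | zad1/src-org/Lib/state.py | __is_mode_good
-- ===== SOURCE A (Python) =====
-- def __is_mode_good(mode: str) -> bool:
--     if len(mode) != 4:
--         return False
--     unique: set[str] = set()
--     for c in mode:
--         if c not in ('L', 'D', 'U', 'R'):
--             return False
--         unique.add(c)
--     if len(unique) != 4:
--         return False
--     return True
-- ===== SOURCE B (Python) =====
-- def __is_mode_good(mode: str) -> bool:
--     return sorted(mode) == ['D', 'L', 'R', 'U']
-- ===== Notes on version B (the rewrite author's own statement) =====
-- stated objective: simpler
-- what changed: Replaces the length guard plus per-character membership/distinctness scan with a set by a single canonical-form comparison: sorted(mode) == ['D','L','R','U'], which rejects wrong length, foreign characters and duplicates at once.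
import Mathlib
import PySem

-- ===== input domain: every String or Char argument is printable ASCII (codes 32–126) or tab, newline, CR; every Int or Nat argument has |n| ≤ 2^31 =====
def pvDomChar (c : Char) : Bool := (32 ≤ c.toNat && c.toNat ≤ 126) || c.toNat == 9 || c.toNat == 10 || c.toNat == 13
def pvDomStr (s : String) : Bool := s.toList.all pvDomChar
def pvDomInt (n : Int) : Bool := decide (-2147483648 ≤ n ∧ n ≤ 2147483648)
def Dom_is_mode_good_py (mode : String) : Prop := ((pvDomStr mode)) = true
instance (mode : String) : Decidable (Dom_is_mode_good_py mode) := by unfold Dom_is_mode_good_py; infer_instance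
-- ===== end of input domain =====

-- B replaces A's length guard + per-character membership/distinctness scan with one
-- canonical-form comparison sorted(mode) == ['D','L','R','U'] (simpler).

-- ===== PORT A =====
-- the 'for c in mode' loop: early 'return False' modelled as none
def isModeGoodLoop : List Char → PySem.Set Char → Option (PySem.Set Char)
  | [], unique => some unique
  | c :: cs, unique =>
      if c ∈ (['L', 'D', 'U', 'R'] : List Char) then
        isModeGoodLoop cs (PySem.Set.add unique c)
      else none

def is_mode_good_py (mode : String) : Bool :=
  if PySem.Str.len mode ≠ 4 then false
  else
    match isModeGoodLoop mode.toList PySem.Set.empty with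
    | none => false
    | some unique => if PySem.Set.len unique ≠ 4 then false else true

-- ===== PORT B =====
def is_mode_good_py_alt (mode : String) : Bool :=
  decide (PySem.List.sorted mode.toList (fun x => x) false = ['D', 'L', 'R', 'U'])

-- ===== PRECONDITION & SPEC =====
def Spec_is_mode_good_py (mode : String) (out : Bool) : Prop := out = is_mode_good_py_alt mode
instance (mode : String) (out : Bool) : Decidable (Spec_is_mode_good_py mode out) := by unfold Spec_is_mode_good_py; infer_instance

-- ===== CLAIM (what is proved, stated in full; the proofs are below) =====
def Claim_equal_is_mode_good_py : Prop := ∀ (mode : String), Dom_is_mode_good_py mode → Spec_is_mode_good_py mode (is_mode_good_py mode)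

-- ===== LEMMAS AND PROOFS =====

-- the loop returns None (early False) as soon as one character is outside LDUR
lemma isModeGoodLoop_none {l : List Char} (u : PySem.Set Char)
    (h : ¬ ∀ c ∈ l, c ∈ (['L', 'D', 'U', 'R'] : List Char)) :
    isModeGoodLoop l u = none := by
  induction l generalizing u with
  | nil => exact absurd (by simp) h
  | cons c cs ih =>
      by_cases hc : c ∈ (['L', 'D', 'U', 'R'] : List Char)
      · simp only [isModeGoodLoop, if_pos hc]
        refine ih _ (fun hall => h ?_)
        simp only [List.forall_mem_cons]
        exact ⟨by simpa using hc, hall⟩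
      · simp [isModeGoodLoop, hc]

lemma sorted_ne_of_bad {l : List Char}
    (h : ¬ ∀ c ∈ l, c ∈ (['L', 'D', 'U', 'R'] : List Char)) :
    PySem.List.sorted l (fun x => x) false ≠ ['D', 'L', 'R', 'U'] := by
  intro heq
  push Not at h
  obtain ⟨c, hcl, hcn⟩ := h
  have : c ∈ PySem.List.sorted l (fun x => x) false := (PySem.List.mem_sorted _ _ _ _).mpr hcl
  rw [heq] at this
  simp only [List.mem_cons, List.not_mem_nil, or_false] at this hcn
  tauto

lemma main_list (mode : String) :
    is_mode_good_py mode = is_mode_good_py_alt mode := by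
  unfold is_mode_good_py is_mode_good_py_alt
  by_cases h4 : mode.toList.length = 4
  · rw [if_neg (by simp [PySem.Str.len, h4])]
    by_cases hall : ∀ c ∈ mode.toList, c ∈ (['L', 'D', 'U', 'R'] : List Char)
    · -- every character is one of L D U R: enumerate the 4⁴ possibilities
      obtain ⟨a, b, c, d, hl⟩ : ∃ a b c d, mode.toList = [a, b, c, d] := by
        match hm : mode.toList, h4 with
        | [a, b, c, d], _ => exact ⟨a, b, c, d, rfl⟩
      rw [hl] at hall ⊢
      have ha := hall a (by simp); have hb := hall b (by simp)
      have hc := hall c (by simp); have hd := hall d (by simp)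
      simp only [List.mem_cons, List.not_mem_nil, or_false] at ha hb hc hd
      rcases ha with rfl | rfl | rfl | rfl <;> rcases hb with rfl | rfl | rfl | rfl <;>
        rcases hc with rfl | rfl | rfl | rfl <;> rcases hd with rfl | rfl | rfl | rfl <;> decide
    · rw [isModeGoodLoop_none _ hall]
      simp [sorted_ne_of_bad hall]
  · rw [if_pos (by simp [PySem.Str.len] at *; omega)]
    have : PySem.List.sorted mode.toList (fun x => x) false ≠ ['D', 'L', 'R', 'U'] := by
      intro heq
      have := congrArg List.length heq
      rw [PySem.List.length_sorted] at this
      simp at this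
      exact h4 this
    simp [this]

-- ===== VERDICT (by name: the statement is the Claim_ definition above) =====
theorem is_mode_good_py_spec : Claim_equal_is_mode_good_py := by
  intro mode _
  unfold Spec_is_mode_good_py
  exact main_list mode
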